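-- pv_equiv track=rewrite | github.com/ryongseong/programmers | 인사고과/인사고과1.py | solution
-- ===== SOURCE A (Python) =====
-- def solution(scores):
--     woanho_scores = scores[0][0] + scores[0][1]
--
--     if all(woanho_scores >= score[0] + score[1] for score in scores):
--         return -1
--
--     ranks = 1
--     for score in scores[1:]:
--         total_score = score[0] + score[1]
--         if woanho_scores < total_score:
--             ranks += 1
--
--     return ranks
-- ===== SOURCE B (Python) =====
-- def solution(scores):
--     totals = [s[0] + s[1] for s in scores]
--     woanho = totals[0]
--     pos = sorted(totals, reverse=True).index(woanho)
--     return -1 if pos == 0 else pos + 1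
-- ===== Notes on version B (the rewrite author's own statement) =====
-- stated objective: idiomatic
-- what changed: Replaces A's two passes (an all() scan plus a counting loop over scores[1:]) by sorting all totals descending and reading off the first person's rank as the index of their total in the sorted list.
import Mathlib
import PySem

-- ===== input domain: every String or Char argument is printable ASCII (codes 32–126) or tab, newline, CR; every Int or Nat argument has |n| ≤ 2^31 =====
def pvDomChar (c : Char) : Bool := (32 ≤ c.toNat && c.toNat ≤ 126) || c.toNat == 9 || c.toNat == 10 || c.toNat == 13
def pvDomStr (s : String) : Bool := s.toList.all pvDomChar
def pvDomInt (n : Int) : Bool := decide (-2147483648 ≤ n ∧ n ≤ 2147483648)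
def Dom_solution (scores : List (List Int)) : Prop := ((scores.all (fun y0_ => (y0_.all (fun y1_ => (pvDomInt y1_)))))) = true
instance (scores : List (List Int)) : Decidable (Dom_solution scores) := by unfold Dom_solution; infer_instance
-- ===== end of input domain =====

-- B replaces A's two passes (an all() scan plus a counting loop over the tail) by
-- sorting the totals descending and reading the first person's rank off the index
-- of their total in the sorted list (idiomatic alternative, not claimed faster).


-- ===== PORT A =====
-- score[0] + score[1], exact via PySem.List.pyGet? (Pre_ keeps every row in range)
def pvTotal (s : List Int) : Int :=
  (PySem.List.pyGet? s 0).getD 0 + (PySem.List.pyGet? s 1).getD 0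

def solution (scores : List (List Int)) : Int :=
  let woanho := pvTotal ((PySem.List.pyGet? scores 0).getD [])
  if scores.all (fun score => decide (pvTotal score ≤ woanho)) then -1
  else (PySem.List.slice scores (some 1) none).foldl
    (fun ranks score => if woanho < pvTotal score then ranks + 1 else ranks) 1

-- ===== PORT B =====
def solution_alt (scores : List (List Int)) : Int :=
  let totals := scores.map (fun s => pvTotal s)
  let woanho := (PySem.List.pyGet? totals 0).getD 0
  let pos := (PySem.List.index? (PySem.List.sorted totals (fun x => x) true) woanho).getD 0
  if pos = 0 then -1 else (pos : Int) + 1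

-- ===== PRECONDITION & SPEC =====
-- Pre_ excludes exactly the inputs where Python A raises IndexError: an empty
-- scores list or a row with fewer than two entries.
def Pre_solution (scores : List (List Int)) : Prop :=
  scores ≠ [] ∧ ∀ s ∈ scores, 2 ≤ s.length
instance (scores : List (List Int)) : Decidable (Pre_solution scores) := by
  unfold Pre_solution; infer_instance
def pvWitness_solution : List (List Int) := [[1, 2], [3, 4]]

def Spec_solution (scores : List (List Int)) (out : Int) : Prop := out = solution_alt scores
instance (scores : List (List Int)) (out : Int) : Decidable (Spec_solution scores out) := by unfold Spec_solution; infer_instance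

-- ===== CLAIM (what is proved, stated in full; the proofs are below) =====
def Claim_equal_solution : Prop := ∀ (scores : List (List Int)), Dom_solution scores → Pre_solution scores → Spec_solution scores (solution scores)

-- ===== LEMMAS AND PROOFS =====

-- in a descending-sorted list, the first occurrence of a member w sits right
-- after the elements strictly greater than w
lemma index_eq_countP_of_sorted_desc (w : Int) (l : List Int)
    (hp : l.Pairwise (fun a b => b ≤ a)) (hm : w ∈ l) :
    PySem.List.index? l w = some (l.countP (fun x => decide (w < x))) := by
  induction l with
  | nil => cases hm
  | cons x t ih =>
    rcases List.pairwise_cons.mp hp with ⟨hx, ht⟩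
    by_cases hxw : x = w
    · subst hxw
      rw [PySem.List.index?_cons_self, List.countP_cons]
      simp only [decide_eq_true_eq]
      have : ¬ x < x := lt_irrefl x
      have hcnt : t.countP (fun y => decide (x < y)) = 0 := by
        rw [List.countP_eq_zero]
        intro y hy
        simpa using not_lt.mpr (hx y hy)
      simp [hcnt]
    · have hmt : w ∈ t := by
        rcases List.mem_cons.mp hm with h | h
        · exact absurd h.symm hxw
        · exact h
      have hwx : w < x := lt_of_le_of_ne (hx w hmt) (fun h => hxw h.symm)
      rw [PySem.List.index?_cons_of_ne t hxw, ih ht hmt, List.countP_cons]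
      simp [hwx]

lemma foldl_if_add_one (w : Int) (l : List (List Int)) (init : Int) :
    l.foldl (fun ranks score => if w < pvTotal score then ranks + 1 else ranks) init
      = init + (l.countP (fun s => decide (w < pvTotal s)) : Int) := by
  induction l generalizing init with
  | nil => simp
  | cons x t ih =>
    simp only [List.foldl_cons, List.countP_cons, ih]
    by_cases h : w < pvTotal x
    · simp [h]; omega
    · simp [h]

-- ===== VERDICT (by name: the statement is the Claim_ definition above) =====
theorem solution_spec : Claim_equal_solution := by
  intro scores _ hpre
  rcases hpre with ⟨hne, hlen⟩
  obtain ⟨r, rest, rfl⟩ := List.exists_cons_of_ne_nil hne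
  have hg1 : PySem.List.pyGet? (r :: rest) (0 : Int) = some r := by
    simp [PySem.List.pyGet?, PySem.List.pyIdx?]
  have hg2 : PySem.List.pyGet? (pvTotal r :: rest.map (fun s => pvTotal s)) (0 : Int)
      = some (pvTotal r) := by
    simp [PySem.List.pyGet?, PySem.List.pyIdx?]
  have hmem : pvTotal r ∈ (pvTotal r :: rest.map (fun s => pvTotal s)) := List.mem_cons_self
  have hidx : PySem.List.index?
      (PySem.List.sorted (pvTotal r :: rest.map (fun s => pvTotal s)) (fun x => x) true)
      (pvTotal r)
      = some ((pvTotal r :: rest.map (fun s => pvTotal s)).countP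
          (fun x => decide (pvTotal r < x))) := by
    have hperm := PySem.List.sorted_perm (pvTotal r :: rest.map (fun s => pvTotal s))
      (fun x => x) true
    have hpair : (PySem.List.sorted (pvTotal r :: rest.map (fun s => pvTotal s))
        (fun x => x) true).Pairwise (fun a b => b ≤ a) := by
      simpa using PySem.List.sorted_pairwise_rev
        (pvTotal r :: rest.map (fun s => pvTotal s)) (fun x => x)
    have hmem' : pvTotal r ∈ PySem.List.sorted (pvTotal r :: rest.map (fun s => pvTotal s))
        (fun x => x) true :=
      (PySem.List.mem_sorted _ (fun x => x) true _).mpr hmem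
    rw [index_eq_countP_of_sorted_desc (pvTotal r) _ hpair hmem']
    exact congrArg some (hperm.countP_eq _)
  have hcount : (pvTotal r :: rest.map (fun s => pvTotal s)).countP
        (fun x => decide (pvTotal r < x))
      = rest.countP (fun s => decide (pvTotal r < pvTotal s)) := by
    rw [List.countP_cons, List.countP_map]
    simp [Function.comp_def]
  unfold Spec_solution solution solution_alt
  simp only [List.map_cons, hg1, Option.getD_some, PySem.List.slice_from_one,
    List.tail_cons, hg2, hidx, hcount]
  by_cases hall : ∀ s ∈ (r :: rest), pvTotal s ≤ pvTotal r
  · have h0 : rest.countP (fun s => decide (pvTotal r < pvTotal s)) = 0 := by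
      rw [List.countP_eq_zero]
      intro s hs
      simpa using not_lt.mpr (hall s (List.mem_cons_of_mem r hs))
    have hallb : (r :: rest).all (fun score => decide (pvTotal score ≤ pvTotal r)) = true := by
      simpa [List.all_eq_true] using hall
    rw [if_pos hallb, h0]
    simp
  · have hposne : rest.countP (fun s => decide (pvTotal r < pvTotal s)) ≠ 0 := by
      intro h0
      apply hall
      intro s hs
      rcases List.mem_cons.mp hs with rfl | hs'
      · exact le_refl _
      · by_contra hlt
        have := List.countP_eq_zero.mp h0 s hs'
        simp [not_le.mp hlt] at this
    have hallb : ¬ (r :: rest).all (fun score => decide (pvTotal score ≤ pvTotal r)) = true := by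
      simpa [List.all_eq_true] using hall
    rw [if_neg hallb, if_neg hposne, foldl_if_add_one]
    omega
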